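-- pv_equiv track=rewrite | github.com/VictorMinsky/Algorithmic-Tasks | Codewars/7 kyu/Sum the Repeats.py | repeat_sum
-- ===== SOURCE A (Python) =====
-- def repeat_sum(l):
--     all_lists = set([x for b in l for x in b])
--     ans = 0
--     for i in all_lists:
--         flag = 0
--         for z in l:
--             if i in z:
--                 flag += 1
--             if flag == 2:
--                 ans += i
--                 break
--     return ans
-- ===== SOURCE B (Python) =====
-- def repeat_sum(l):
--     seen = set()
--     repeated = set()
--     for z in l:
--         for v in set(z):
--             if v in seen:
--                 repeated.add(v)
--             else:
--                 seen.add(v)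
--     return sum(repeated)
-- ===== Notes on version B (the rewrite author's own statement) =====
-- stated objective: simpler
-- what changed: Replaced A's per-candidate rescan of all sublists (with an early-break flag counter) by one forward pass maintaining two sets, seen and repeated, summing repeated at the end.
import Mathlib
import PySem

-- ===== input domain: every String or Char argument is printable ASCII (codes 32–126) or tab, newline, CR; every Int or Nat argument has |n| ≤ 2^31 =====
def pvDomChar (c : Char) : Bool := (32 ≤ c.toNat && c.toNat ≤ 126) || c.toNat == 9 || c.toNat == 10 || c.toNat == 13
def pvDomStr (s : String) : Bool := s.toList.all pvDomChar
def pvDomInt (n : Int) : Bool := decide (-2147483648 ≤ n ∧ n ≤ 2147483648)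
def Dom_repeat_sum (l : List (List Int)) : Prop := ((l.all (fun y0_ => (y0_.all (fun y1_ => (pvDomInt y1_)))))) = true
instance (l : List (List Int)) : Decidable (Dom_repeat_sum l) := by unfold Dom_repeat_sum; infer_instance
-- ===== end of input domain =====

-- B replaces A's per-candidate rescan of all sublists by one forward pass with two
-- sets (seen / repeated); objective: simpler. Both sum a set, which is order-independent.

-- ===== PORT A =====
-- inner 'for z in l' loop of A: flag counter with break at 2 (then ans += i)
def aInner (i : Int) : List (List Int) → Int → Int
  | [], _ => 0
  | z :: rest, flag =>
      let flag' := if i ∈ z then flag + 1 else flag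
      if flag' = 2 then i else aInner i rest flag'

def repeat_sum (l : List (List Int)) : Int :=
  let all_lists := PySem.Set.ofList (l.flatMap (fun b => b))
  all_lists.foldl (fun ans i => ans + aInner i l 0) 0

-- ===== PORT B =====
-- one classification step: v already seen → repeated, else → seen
def bStep (sr : PySem.Set Int × PySem.Set Int) (v : Int) : PySem.Set Int × PySem.Set Int :=
  if v ∈ sr.1 then (sr.1, PySem.Set.add sr.2 v) else (PySem.Set.add sr.1 v, sr.2)

def repeat_sum_alt (l : List (List Int)) : Int :=
  let final := l.foldl (fun sr z => (PySem.Set.ofList z).foldl bStep sr)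
                 ((PySem.Set.empty : PySem.Set Int), (PySem.Set.empty : PySem.Set Int))
  final.2.sum

-- ===== PRECONDITION & SPEC =====
def Spec_repeat_sum (l : List (List Int)) (out : Int) : Prop := out = repeat_sum_alt l
instance (l : List (List Int)) (out : Int) : Decidable (Spec_repeat_sum l out) := by unfold Spec_repeat_sum; infer_instance

-- ===== CLAIM (what is proved, stated in full; the proofs are below) =====
def Claim_equal_repeat_sum : Prop := ∀ (l : List (List Int)), Dom_repeat_sum l → Spec_repeat_sum l (repeat_sum l)

-- ===== LEMMAS AND PROOFS =====

-- number of sublists of l containing i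
def cnt (i : Int) (l : List (List Int)) : Nat := l.countP (fun z => decide (i ∈ z))

theorem aInner_eq (i : Int) (l : List (List Int)) :
    ∀ flag : Int, flag ≤ 1 → aInner i l flag = if 2 ≤ flag + (cnt i l : Int) then i else 0 := by
  induction l with
  | nil =>
      intro flag h
      simp [aInner, cnt]
      omega
  | cons z rest ih =>
      intro flag h
      by_cases hz : i ∈ z
      · simp only [aInner, hz, if_pos]
        by_cases h2 : flag + 1 = 2
        · have : (2 : Int) ≤ flag + (cnt i (z :: rest) : Int) := by
            simp [cnt, hz]
            omega
          simp [h2, this]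
        · rw [if_neg h2, ih (flag + 1) (by omega)]
          simp [cnt, hz]
          congr 1
          · simp only [eq_iff_iff]; constructor <;> intro <;> omega
      · simp only [aInner, hz, if_false]
        have h2 : ¬ (flag = 2) := by omega
        rw [if_neg h2, ih flag h]
        simp [cnt, hz]

-- inner fold of B over a duplicate-free list d
theorem bInner_spec (d : List Int) : ∀ (s r : PySem.Set Int), d.Nodup → s.Nodup → r.Nodup →
    (∀ x, x ∈ (d.foldl bStep (s, r)).1 ↔ x ∈ s ∨ x ∈ d) ∧
    (∀ x, x ∈ (d.foldl bStep (s, r)).2 ↔ x ∈ r ∨ (x ∈ d ∧ x ∈ s)) ∧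
    (d.foldl bStep (s, r)).1.Nodup ∧ (d.foldl bStep (s, r)).2.Nodup := by
  induction d with
  | nil => intro s r _ hs hr; simp [hs, hr]
  | cons v d ih =>
      intro s r hd hs hr
      have hvd : v ∉ d := (List.nodup_cons.mp hd).1
      have hd' : d.Nodup := (List.nodup_cons.mp hd).2
      by_cases hv : v ∈ s
      · have hstep : bStep (s, r) v = (s, PySem.Set.add r v) := by simp [bStep, hv]
        simp only [List.foldl_cons, hstep]
        obtain ⟨m1, m2, n1, n2⟩ := ih s (PySem.Set.add r v) hd' hs (PySem.Set.nodup_add _ _ hr)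
        refine ⟨fun x => ?_, fun x => ?_, n1, n2⟩
        · rw [m1 x]; simp
          constructor
          · rintro (h | h) <;> tauto
          · rintro (h | h | h) <;> try tauto
            subst h; tauto
        · rw [m2 x]; simp [PySem.Set.mem_add]
          constructor
          · rintro ((h | h) | h)
            · tauto
            · subst h; tauto
            · tauto
          · rintro (h | ⟨(h1 | h1), h2⟩)
            · tauto
            · subst h1; tauto
            · tauto
      · have hstep : bStep (s, r) v = (PySem.Set.add s v, r) := by simp [bStep, hv]
        simp only [List.foldl_cons, hstep]
        obtain ⟨m1, m2, n1, n2⟩ := ih (PySem.Set.add s v) r hd' (PySem.Set.nodup_add _ _ hs) hr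
        refine ⟨fun x => ?_, fun x => ?_, n1, n2⟩
        · rw [m1 x]; simp [PySem.Set.mem_add]; tauto
        · rw [m2 x]; simp [PySem.Set.mem_add]
          constructor
          · rintro (h | ⟨h1, h2 | h2⟩)
            · tauto
            · tauto
            · subst h2; exact absurd h1 hvd
          · rintro (h | ⟨(h1 | h1), h2⟩)
            · tauto
            · subst h1; exact absurd h2 hv
            · tauto

-- outer fold of B
theorem bOuter_spec (l : List (List Int)) : ∀ (s r : PySem.Set Int), s.Nodup → r.Nodup →
    (∀ x, x ∈ (l.foldl (fun sr z => (PySem.Set.ofList z).foldl bStep sr) (s, r)).2 ↔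
        x ∈ r ∨ (x ∈ s ∧ 1 ≤ cnt x l) ∨ 2 ≤ cnt x l) ∧
    (l.foldl (fun sr z => (PySem.Set.ofList z).foldl bStep sr) (s, r)).2.Nodup := by
  induction l with
  | nil => intro s r _ hr; simp [cnt, hr]
  | cons z rest ih =>
      intro s r hs hr
      obtain ⟨m1, m2, n1, n2⟩ := bInner_spec (PySem.Set.ofList z) s r (PySem.Set.nodup_ofList _) hs hr
      simp only [List.foldl_cons]
      obtain ⟨hmem, hnd⟩ := ih ((PySem.Set.ofList z).foldl bStep (s, r)).1
        ((PySem.Set.ofList z).foldl bStep (s, r)).2 n1 n2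
      refine ⟨fun x => ?_, hnd⟩
      rw [hmem x, m1 x, m2 x]
      have hbridge : (∃ a ∈ rest, x ∈ a) ↔ 0 < List.countP (fun z => decide (x ∈ z)) rest := by
        rw [List.countP_pos_iff]; simp
      simp only [PySem.Set.mem_ofList, cnt, List.countP_cons]
      by_cases hz : x ∈ z <;> by_cases hsx : x ∈ s <;> simp [hz, hsx] <;>
        first
        | omega
        | (rw [hbridge]; by_cases hxr : x ∈ r <;> simp [hxr] <;>
            first
            | omega
            | exact fun h => hbridge.mpr (by omega))

theorem sum_map_ite (p : Int → Prop) [DecidablePred p] (S : List Int) :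
    (S.map (fun i => if p i then i else 0)).sum = (S.filter (fun i => decide (p i))).sum := by
  induction S with
  | nil => rfl
  | cons a S ih =>
      by_cases hp : p a <;> simp [hp, ih]

theorem one_le_cnt_iff (x : Int) (l : List (List Int)) :
    1 ≤ cnt x l ↔ x ∈ l.flatMap (fun b => b) := by
  simp [cnt, Nat.one_le_iff_ne_zero]

-- ===== VERDICT (by name: the statement is the Claim_ definition above) =====
theorem repeat_sum_spec : Claim_equal_repeat_sum := by
  intro l _
  unfold Spec_repeat_sum
  set S := PySem.Set.ofList (l.flatMap (fun b => b)) with hS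
  have hA : S.foldl (fun ans i => ans + aInner i l 0) 0
      = (S.map (fun i => if 2 ≤ (cnt i l : Int) then i else 0)).sum := by
    rw [PySem.List.foldl_add]
    simp only [zero_add]
    congr 1
    apply List.map_congr_left
    intro i _
    rw [aInner_eq i l 0 (by omega)]
    simp
  obtain ⟨hmem, hnd⟩ := bOuter_spec l PySem.Set.empty PySem.Set.empty List.nodup_nil List.nodup_nil
  set R := (l.foldl (fun sr z => (PySem.Set.ofList z).foldl bStep sr)
      ((PySem.Set.empty : PySem.Set Int), (PySem.Set.empty : PySem.Set Int))).2 with hR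
  have hRmem : ∀ x, x ∈ R ↔ 2 ≤ cnt x l := by
    intro x
    rw [hmem x]
    simp [PySem.Set.empty]
  have hfilter : ∀ x, x ∈ S.filter (fun i => decide (2 ≤ (cnt i l : Int))) ↔ 2 ≤ cnt x l := by
    intro x
    simp only [List.mem_filter, hS, PySem.Set.mem_ofList, decide_eq_true_eq]
    constructor
    · rintro ⟨_, h⟩; exact_mod_cast h
    · intro h
      refine ⟨(one_le_cnt_iff x l).mp (by omega), by exact_mod_cast h⟩
  have hperm : (S.filter (fun i => decide (2 ≤ (cnt i l : Int)))).Perm R := by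
    rw [List.perm_ext_iff_of_nodup (List.Nodup.filter _ (PySem.Set.nodup_ofList _)) hnd]
    intro x
    rw [hfilter x, hRmem x]
  have ha : repeat_sum l = S.foldl (fun ans i => ans + aInner i l 0) 0 := rfl
  have hb : repeat_sum_alt l = R.sum := rfl
  rw [ha, hb, hA, sum_map_ite (fun i => 2 ≤ (cnt i l : Int)) S, hperm.sum_eq]
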